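-- pv_equiv track=rewrite | github.com/zigbeeprotocol/TaintBFuzz | fuzzing/lib_zstack.py | count_non_255_bits
-- ===== SOURCE A (Python) =====
-- def count_non_255_bits(bitmap):
--     count = 0
--     bits_total = 0
--     for bit in bitmap:
--         if bit != 255:
--             count += 1
--             bits_total += (255 - bit)
--     return count, bits_total
-- ===== SOURCE B (Python) =====
-- def count_non_255_bits(bitmap):
--     bitmap = list(bitmap)
--     n = len(bitmap)
--     return n - bitmap.count(255), 255 * n - sum(bitmap)
-- ===== Notes on version B (the rewrite author's own statement) =====
-- stated objective: faster
-- what changed: Replaces A's fused conditional accumulator loop with closed-form arithmetic identities: count = len - count(255) and total = 255*len - sum(bitmap), valid because a 255 byte contributes zero deficit; the per-element work moves into C-level len/count/sum.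
import Mathlib
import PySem

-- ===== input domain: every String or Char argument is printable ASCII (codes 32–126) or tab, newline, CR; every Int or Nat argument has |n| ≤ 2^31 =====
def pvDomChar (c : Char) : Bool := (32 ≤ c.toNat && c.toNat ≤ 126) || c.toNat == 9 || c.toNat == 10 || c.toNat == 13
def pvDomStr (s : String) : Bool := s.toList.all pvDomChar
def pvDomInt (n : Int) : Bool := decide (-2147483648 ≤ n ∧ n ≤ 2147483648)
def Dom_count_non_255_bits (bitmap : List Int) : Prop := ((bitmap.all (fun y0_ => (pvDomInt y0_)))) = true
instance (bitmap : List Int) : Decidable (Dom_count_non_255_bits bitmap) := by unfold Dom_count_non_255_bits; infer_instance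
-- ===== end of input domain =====

-- B replaces A's fused conditional accumulator loop with closed-form arithmetic: count = len - count(255), total = 255*len - sum (objective: alternative).

-- ===== PORT A =====
def count_non_255_bits (bitmap : List Int) : Int × Int :=
  bitmap.foldl (fun (st : Int × Int) bit =>
    if bit != 255 then (st.1 + 1, st.2 + (255 - bit)) else st) (0, 0)

-- ===== PORT B =====
def count_non_255_bits_alt (bitmap : List Int) : Int × Int :=
  let n : Int := bitmap.length
  (n - PySem.List.count bitmap 255, 255 * n - bitmap.sum)

-- ===== PRECONDITION & SPEC =====
def Spec_count_non_255_bits (bitmap : List Int) (out : Int × Int) : Prop := out = count_non_255_bits_alt bitmap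
instance (bitmap : List Int) (out : Int × Int) : Decidable (Spec_count_non_255_bits bitmap out) := by unfold Spec_count_non_255_bits; infer_instance

-- ===== CLAIM =====
def Claim_equal_count_non_255_bits : Prop := ∀ (bitmap : List Int), Dom_count_non_255_bits bitmap → Spec_count_non_255_bits bitmap (count_non_255_bits bitmap)

-- ===== LEMMAS AND PROOFS =====
theorem foldl_shift (l : List Int) (c t : Int) :
    l.foldl (fun (st : Int × Int) bit =>
      if bit != 255 then (st.1 + 1, st.2 + (255 - bit)) else st) (c, t)
    = (c + (count_non_255_bits_alt l).1, t + (count_non_255_bits_alt l).2) := by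
  induction l generalizing c t with
  | nil => simp [count_non_255_bits_alt, PySem.List.count]
  | cons h l ih =>
    simp only [List.foldl_cons]
    by_cases hh : h = 255
    · subst hh
      rw [if_neg (by simp), ih]
      simp only [count_non_255_bits_alt, PySem.List.count_eq, List.count_cons_self,
        List.length_cons, List.sum_cons]
      simp only [Prod.mk.injEq]; constructor <;> push_cast <;> ring
    · rw [if_pos (by simpa using hh), ih]
      simp only [count_non_255_bits_alt, PySem.List.count_eq, List.length_cons, List.sum_cons]
      rw [List.count_cons_of_ne hh]
      simp only [Prod.mk.injEq]; constructor <;> push_cast <;> ring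

-- ===== VERDICT =====
theorem count_non_255_bits_spec : Claim_equal_count_non_255_bits := by
  intro bitmap _
  unfold Spec_count_non_255_bits count_non_255_bits
  rw [foldl_shift]
  simp
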